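-- pv_equiv track=rewrite | github.com/ish666/TestOpt | priortization/coverage_based.py | prioritize_by_coverage
-- ===== SOURCE A (Python) =====
-- def prioritize_by_coverage(test_cases: dict) -> list:
--     remaining_coverage = set()
--     for coverage in test_cases.values():
--         remaining_coverage.update(coverage)
--
--     prioritized = []
--     selected = set()
--
--     while test_cases:
--         best_tc = None
--         best_gain = -1
--
--         for tc, covered in test_cases.items():
--             new_coverage = covered - selected
--             gain = len(new_coverage)
--             if gain > best_gain:
--                 best_gain = gain
--                 best_tc = tc
--
--         if best_tc is None:
--             break
--
--         prioritized.append(best_tc)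
--         selected.update(test_cases[best_tc])
--         del test_cases[best_tc]
--
--     return prioritized
-- ===== SOURCE B (Python) =====
-- def prioritize_by_coverage(test_cases: dict) -> list:
--     # Inverted index (element -> tests containing it) + incrementally maintained
--     # integer gain counters: when a test is picked, each newly covered element
--     # decrements the gain of exactly the tests that contain it, so no set
--     # difference is ever recomputed.  NOTE: A empties its argument dict; this
--     # equivalence is about the return value only (B does not mutate test_cases).
--     names = list(test_cases)
--     covs = [list(c) for c in test_cases.values()]
--     n = len(names)
--     inv = {}
--     for i, c in enumerate(covs):
--         for e in c:
--             inv.setdefault(e, []).append(i)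
--     gain = [len(c) for c in covs]
--     alive = [True] * n
--     covered = set()
--     prioritized = []
--     for _ in range(n):
--         best = -1
--         bg = -1
--         for i in range(n):
--             if alive[i] and gain[i] > bg:
--                 best = i
--                 bg = gain[i]
--         alive[best] = False
--         prioritized.append(names[best])
--         for e in covs[best]:
--             if e not in covered:
--                 covered.add(e)
--                 for t in inv[e]:
--                     gain[t] -= 1
--     return prioritized
-- ===== Notes on version B (the rewrite author's own statement) =====
-- stated objective: faster
-- what changed: B builds an inverted index (element -> tests containing it) once and maintains integer gain counters that are decremented only for the tests containing each newly covered element, instead of A recomputing covered - selected for every remaining test in every round; A's emptying of its argument dict is not reproduced (return value only).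
import Mathlib
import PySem

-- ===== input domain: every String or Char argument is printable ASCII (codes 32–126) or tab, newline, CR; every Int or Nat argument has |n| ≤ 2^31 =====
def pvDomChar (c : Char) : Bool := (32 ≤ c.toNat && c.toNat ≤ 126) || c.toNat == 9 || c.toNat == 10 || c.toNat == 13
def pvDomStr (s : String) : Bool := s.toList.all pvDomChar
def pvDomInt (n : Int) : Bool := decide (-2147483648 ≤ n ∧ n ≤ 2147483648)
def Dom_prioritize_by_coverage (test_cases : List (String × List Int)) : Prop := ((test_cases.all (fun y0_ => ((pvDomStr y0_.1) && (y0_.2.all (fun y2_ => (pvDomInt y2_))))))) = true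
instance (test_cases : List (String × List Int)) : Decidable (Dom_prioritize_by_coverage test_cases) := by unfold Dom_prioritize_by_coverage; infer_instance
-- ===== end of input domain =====

-- B replaces A's per-round recomputation of `covered - selected` for every remaining test
-- by an inverted index (element -> tests containing it) and incrementally maintained integer
-- gain counters, decremented only for the tests that contain a newly covered element.
-- A empties its argument dict in place, B does not: the equivalence proved here is about
-- the return value only.

-- ===== PORT A =====
-- 'for tc, covered in test_cases.items(): …' — the best-candidate scan (strict >, first max wins)
def pvABest (sel : PySem.Set Int) : List (String × List Int) → Option String × Int → Option String × Int
  | [], best => best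
  | (tc, covered) :: rest, (bt, bg) =>
      let gain : Int := PySem.Set.len (PySem.Set.diff (PySem.Set.ofList covered) sel)
      if gain > bg then pvABest sel rest (some tc, gain) else pvABest sel rest (bt, bg)

-- 'while test_cases:' — every round deletes exactly one key, so test_cases.length rounds suffice
def pvALoop : Nat → List (String × List Int) → PySem.Set Int → List String → List String
  | 0, _, _, prioritized => prioritized
  | fuel+1, tcs, sel, prioritized =>
    if tcs.isEmpty then prioritized else
      match pvABest sel tcs (none, -1) with
      | (none, _) => prioritized
      | (some tc, _) =>
          let cov := (List.lookup tc tcs).getD []   -- test_cases[best_tc]: key always present here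
          pvALoop fuel (tcs.eraseP (fun q => q.1 == tc)) (PySem.Set.update sel cov)
            (prioritized ++ [tc])

def prioritize_by_coverage (test_cases : List (String × List Int)) : List String :=
  -- remaining_coverage is computed and never read, exactly as in A
  let _remaining_coverage :=
    test_cases.foldl (fun s p => PySem.Set.update s p.2) PySem.Set.empty
  pvALoop test_cases.length test_cases PySem.Set.empty []

-- ===== PORT B =====
-- 'for i, c in enumerate(covs): for e in c: inv.setdefault(e, []).append(i)'
def pvBInv (covs : List (List Int)) : PySem.Dict Int (List Int) :=
  (PySem.List.enumerate covs).foldl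
    (fun d p => p.2.foldl (fun d e => d.modify e [] (· ++ [p.1])) d)
    PySem.Dict.empty

-- 'for i in range(n): if alive[i] and gain[i] > bg: best, bg = i, gain[i]'
def pvBScan (alive : List Bool) (gain : List Int) : List Int → Int × Int → Int × Int
  | [], st => st
  | i :: rest, (best, bg) =>
      if PySem.List.pyGetD alive i false && decide (PySem.List.pyGetD gain i 0 > bg)
      then pvBScan alive gain rest (i, PySem.List.pyGetD gain i 0)
      else pvBScan alive gain rest (best, bg)

-- 'for t in inv[e]: gain[t] -= 1'
def pvBDec (gain : List Int) (ts : List Int) : List Int :=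
  ts.foldl (fun g t => PySem.List.pySetD g t (PySem.List.pyGetD g t 0 - 1)) gain

-- 'for e in covs[best]: if e not in covered: covered.add(e); for t in inv[e]: gain[t] -= 1'
def pvBCover (inv : PySem.Dict Int (List Int)) :
    List Int → PySem.Set Int × List Int → PySem.Set Int × List Int
  | [], st => st
  | e :: rest, (covered, gain) =>
      if PySem.Set.contains covered e then pvBCover inv rest (covered, gain)
      else pvBCover inv rest (PySem.Set.add covered e, pvBDec gain (inv.getD e []))

-- 'for _ in range(n): …' — one round per test; indices never leave range, so the
-- total pySetD/pyGet?-with-default forms coincide with Python's indexing here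
def pvBRounds (names : List String) (covs : List (List Int)) (inv : PySem.Dict Int (List Int)) :
    Nat → List Bool → List Int → PySem.Set Int → List String → List String
  | 0, _, _, _, prioritized => prioritized
  | r+1, alive, gain, covered, prioritized =>
      let st := pvBScan alive gain (PySem.List.pyRange 0 (names.length : Int) 1) (-1, -1)
      let alive' := PySem.List.pySetD alive st.1 false
      let name := (PySem.List.pyGet? names st.1).getD ""
      let cg := pvBCover inv ((PySem.List.pyGet? covs st.1).getD []) (covered, gain)
      pvBRounds names covs inv r alive' cg.2 cg.1 (prioritized ++ [name])

def prioritize_by_coverage_alt (test_cases : List (String × List Int)) : List String :=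
  let names := test_cases.map Prod.fst
  -- 'covs = [list(c) for c in test_cases.values()]': each value is a Python set, whose
  -- list is its distinct elements (iteration order cannot affect the result below)
  let covs := test_cases.map (fun p => PySem.List.dedup p.2)
  let inv := pvBInv covs
  let gain := covs.map (fun c => (c.length : Int))
  let alive := List.replicate names.length true
  pvBRounds names covs inv names.length alive gain PySem.Set.empty []

-- ===== PRECONDITION & SPEC =====
-- Pre_ excludes association lists with duplicate test names: a Python dict argument cannot
-- represent them, so any behaviour of the ports there is an artefact of the encoding.
def Pre_prioritize_by_coverage (test_cases : List (String × List Int)) : Prop :=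
  (test_cases.map Prod.fst).Nodup
instance (test_cases : List (String × List Int)) : Decidable (Pre_prioritize_by_coverage test_cases) := by unfold Pre_prioritize_by_coverage; infer_instance

def pvWitness_prioritize_by_coverage : (List (String × List Int)) :=
  [("a", [1, 2]), ("b", [2, 3, 4]), ("c", [1])]

def Spec_prioritize_by_coverage (test_cases : List (String × List Int)) (out : List String) : Prop := out = prioritize_by_coverage_alt test_cases
instance (test_cases : List (String × List Int)) (out : List String) : Decidable (Spec_prioritize_by_coverage test_cases out) := by unfold Spec_prioritize_by_coverage; infer_instance

-- ===== CLAIM (what is proved, stated in full; the proofs are below) =====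
def Claim_equal_prioritize_by_coverage : Prop := ∀ (test_cases : List (String × List Int)), Dom_prioritize_by_coverage test_cases → Pre_prioritize_by_coverage test_cases → Spec_prioritize_by_coverage test_cases (prioritize_by_coverage test_cases)

-- ===== LEMMAS AND PROOFS =====

-- Reference greedy loop both ports are reduced to: entries tagged with their original index.
def pvGainOf (sel : PySem.Set Int) (cov : List Int) : Int :=
  PySem.Set.len (PySem.Set.diff (PySem.Set.ofList cov) sel)

def pvRefBest (sel : PySem.Set Int) :
    List (Int × String × List Int) → Option (Int × String × List Int) × Int →
    Option (Int × String × List Int) × Int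
  | [], st => st
  | x :: r, (bo, bg) =>
      if pvGainOf sel x.2.2 > bg then pvRefBest sel r (some x, pvGainOf sel x.2.2)
      else pvRefBest sel r (bo, bg)

def pvRefLoop : Nat → List (Int × String × List Int) → PySem.Set Int → List String → List String
  | 0, _, _, acc => acc
  | r+1, rem, sel, acc =>
    if rem.isEmpty then acc else
    match pvRefBest sel rem (none, -1) with
    | (none, _) => acc
    | (some x, _) =>
        pvRefLoop r (rem.filter (fun y => decide (y.1 ≠ x.1))) (PySem.Set.update sel x.2.2)
          (acc ++ [x.2.1])

def pvRemOf (tcs0 : List (String × List Int)) (alive : List Bool) :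
    List (Int × String × List Int) :=
  (PySem.List.enumerate tcs0).filter (fun p => PySem.List.pyGetD alive p.1 false)

def pvEnc : Option (Int × String × List Int) → Int
  | none => -1
  | some x => x.1

-- ---- generic small lemmas ----

theorem pv_gainOf_nonneg (sel : PySem.Set Int) (c : List Int) : 0 ≤ pvGainOf sel c := by
  simp [pvGainOf, PySem.Set.len]

theorem pv_filter_ne_len {α β : Type} [DecidableEq β] (f : α → β) :
    ∀ (l : List α) (x : α), (l.map f).Nodup → x ∈ l →
    (l.filter (fun y => decide (f y ≠ f x))).length + 1 = l.length := by
  intro l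
  induction l with
  | nil => intro x _ hx; simp at hx
  | cons a t ih =>
    intro x hnd hx
    simp only [List.map_cons, List.nodup_cons] at hnd
    rcases List.mem_cons.1 hx with rfl | hxt
    · have ht : t.filter (fun y => decide (f y ≠ f x)) = t := by
        apply List.filter_eq_self.2
        intro y hy
        have : f y ≠ f x := fun h => hnd.1 (h ▸ List.mem_map_of_mem hy)
        simp [this]
      have hhead : (decide (f x ≠ f x)) = false := by simp
      rw [List.filter_cons, hhead]
      simp only [Bool.false_eq_true, if_false, ht, List.length_cons]
    · have hne : f a ≠ f x := fun h => hnd.1 (h ▸ List.mem_map_of_mem hxt)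
      have h2 := ih x hnd.2 hxt
      rw [List.filter_cons, show (decide (f a ≠ f x)) = true by simp [hne]]
      simp only [if_true, List.length_cons]
      omega

-- ---- refBest facts ----

theorem pvRefBest_acc (sel : PySem.Set Int) :
    ∀ (l : List (Int × String × List Int)) (bo : Option (Int × String × List Int)) (bg : Int),
    (pvRefBest sel l (bo, bg)).1 = bo ∨ ∃ x ∈ l, (pvRefBest sel l (bo, bg)).1 = some x := by
  intro l
  induction l with
  | nil => intro bo bg; left; rfl
  | cons y r ih =>
    intro bo bg
    simp only [pvRefBest]
    by_cases h : pvGainOf sel y.2.2 > bg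
    · rw [if_pos h]
      rcases ih (some y) (pvGainOf sel y.2.2) with h1 | ⟨x, hx, h2⟩
      · exact Or.inr ⟨y, List.mem_cons_self .., h1⟩
      · exact Or.inr ⟨x, List.mem_cons_of_mem _ hx, h2⟩
    · rw [if_neg h]
      rcases ih bo bg with h1 | ⟨x, hx, h2⟩
      · exact Or.inl h1
      · exact Or.inr ⟨x, List.mem_cons_of_mem _ hx, h2⟩

theorem pvRefBest_some (sel : PySem.Set Int) (l : List (Int × String × List Int)) (h : l ≠ []) :
    ∃ x ∈ l, (pvRefBest sel l (none, -1)).1 = some x := by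
  match l with
  | [] => exact absurd rfl h
  | z :: r =>
    have hz : pvGainOf sel z.2.2 > -1 :=
      lt_of_lt_of_le (by norm_num) (pv_gainOf_nonneg sel z.2.2)
    have hstep : pvRefBest sel (z :: r) (none, -1)
        = pvRefBest sel r (some z, pvGainOf sel z.2.2) := by
      simp only [pvRefBest, if_pos hz]
    rcases pvRefBest_acc sel r (some z) (pvGainOf sel z.2.2) with h1 | ⟨x, hx, h2⟩
    · exact ⟨z, List.mem_cons_self .., by rw [hstep, h1]⟩
    · exact ⟨x, List.mem_cons_of_mem _ hx, by rw [hstep, h2]⟩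

-- ---- A-side: pvALoop equals the reference loop ----

theorem pvA_scan (sel : PySem.Set Int) :
    ∀ (rem : List (Int × String × List Int)) (bo : Option (Int × String × List Int)) (bg : Int),
    pvABest sel (rem.map (·.2)) (bo.map (fun x => x.2.1), bg)
      = ((pvRefBest sel rem (bo, bg)).1.map (fun x => x.2.1), (pvRefBest sel rem (bo, bg)).2) := by
  intro rem
  induction rem with
  | nil => intro bo bg; rfl
  | cons y r ih =>
    intro bo bg
    simp only [List.map_cons, pvABest, pvRefBest]
    rw [show ((PySem.Set.ofList y.2.2).diff sel).len = pvGainOf sel y.2.2 from rfl]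
    by_cases h : pvGainOf sel y.2.2 > bg
    · rw [if_pos h, if_pos h]
      exact ih (some y) (pvGainOf sel y.2.2)
    · rw [if_neg h, if_neg h]
      exact ih bo bg

theorem pv_lookup_cons (a b : String) (c : List Int) (l : List (String × List Int)) :
    List.lookup a ((b, c) :: l) = if a == b then some c else List.lookup a l := by
  rw [List.lookup_cons]
  cases hab : (a == b) <;> simp

theorem pv_lookup (x : Int × String × List Int) :
    ∀ (rem : List (Int × String × List Int)), (rem.map (fun y => y.2.1)).Nodup → x ∈ rem →
    List.lookup x.2.1 (rem.map (·.2)) = some x.2.2 := by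
  intro rem
  induction rem with
  | nil => intro _ hx; simp at hx
  | cons y t ih =>
    intro hnd hx
    simp only [List.map_cons, List.nodup_cons] at hnd
    rcases List.mem_cons.1 hx with rfl | hxt
    · have h := pv_lookup_cons x.2.1 x.2.1 x.2.2 (t.map (fun z => z.2))
      simp only [BEq.rfl, if_true] at h
      exact h
    · have hne : (x.2.1 == y.2.1) = false := by
        simp only [beq_eq_false_iff_ne, ne_eq]
        intro h
        exact hnd.1 (h ▸ List.mem_map_of_mem hxt)
      have h := pv_lookup_cons x.2.1 y.2.1 y.2.2 (t.map (fun z => z.2))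
      rw [hne] at h
      simp only [Bool.false_eq_true, if_false] at h
      exact h.trans (ih hnd.2 hxt)

theorem pv_erase (x : Int × String × List Int) :
    ∀ (rem : List (Int × String × List Int)),
    (rem.map (·.1)).Nodup → (rem.map (fun y => y.2.1)).Nodup → x ∈ rem →
    (rem.map (·.2)).eraseP (fun q => q.1 == x.2.1)
      = (rem.filter (fun y => decide (y.1 ≠ x.1))).map (·.2) := by
  intro rem
  induction rem with
  | nil => intro _ _ hx; simp at hx
  | cons y t ih =>
    intro hnd1 hnd2 hx
    simp only [List.map_cons, List.nodup_cons] at hnd1 hnd2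
    rcases List.mem_cons.1 hx with rfl | hxt
    · have ht : t.filter (fun z => decide (z.1 ≠ x.1)) = t :=
        List.filter_eq_self.2 (fun z hz => by
          have : z.1 ≠ x.1 := fun h => hnd1.1 (h ▸ List.mem_map_of_mem hz)
          simp [this])
      simp only [List.map_cons, List.eraseP_cons, List.filter_cons]
      have h1 : ((x.2 : String × List Int).1 == x.2.1) = true := by simp
      have h2 : (decide (x.1 ≠ x.1)) = false := by simp
      rw [h1, h2]
      simp only [cond_true, Bool.false_eq_true, if_false]
      rw [ht]
    · have hname : ((y.2 : String × List Int).1 == x.2.1) = false := by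
        simp only [beq_eq_false_iff_ne, ne_eq]
        intro h
        exact hnd2.1 (h ▸ List.mem_map_of_mem hxt)
      have htag : (decide (y.1 ≠ x.1)) = true := by
        simp only [ne_eq, decide_eq_true_eq]
        intro h
        exact hnd1.1 (h ▸ List.mem_map_of_mem hxt)
      simp only [List.map_cons, List.eraseP_cons, List.filter_cons]
      rw [hname, htag]
      simp only [cond_false, if_true, List.map_cons]
      rw [ih hnd1.2 hnd2.2 hxt]

theorem pvA_ref :
    ∀ (fuel : Nat) (rem : List (Int × String × List Int)) (sel : PySem.Set Int) (acc : List String),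
    (rem.map (·.1)).Nodup → (rem.map (fun y => y.2.1)).Nodup →
    pvALoop fuel (rem.map (·.2)) sel acc = pvRefLoop fuel rem sel acc := by
  intro fuel
  induction fuel with
  | zero => intro rem sel acc _ _; rfl
  | succ fuel ih =>
    intro rem sel acc hnd1 hnd2
    cases rem with
    | nil => rfl
    | cons z t =>
      obtain ⟨x, hx, hsome⟩ := pvRefBest_some sel (z :: t) (by simp)
      have hscan := pvA_scan sel (z :: t) none (-1)
      simp only [Option.map_none] at hscan
      have hA1 : pvALoop (fuel+1) ((z :: t).map (·.2)) sel acc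
          = pvALoop fuel (((z :: t).map (·.2)).eraseP (fun q => q.1 == x.2.1))
              (PySem.Set.update sel ((List.lookup x.2.1 ((z :: t).map (·.2))).getD []))
              (acc ++ [x.2.1]) := by
        simp only [pvALoop, List.map_cons, List.isEmpty_cons, Bool.false_eq_true, if_false]
        rw [show pvABest sel (z.2 :: t.map (·.2)) (none, -1)
              = ((pvRefBest sel (z :: t) (none, -1)).1.map (fun x => x.2.1),
                 (pvRefBest sel (z :: t) (none, -1)).2) from hscan, hsome]
        rfl
      rw [hA1, pv_lookup x (z :: t) hnd2 hx, pv_erase x (z :: t) hnd1 hnd2 hx]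
      have hR : pvRefLoop (fuel+1) (z :: t) sel acc
          = pvRefLoop fuel ((z :: t).filter (fun y => decide (y.1 ≠ x.1)))
              (PySem.Set.update sel x.2.2) (acc ++ [x.2.1]) := by
        simp only [pvRefLoop, List.isEmpty_cons, Bool.false_eq_true, if_false]
        rcases hres : pvRefBest sel (z :: t) (none, -1) with ⟨bo, G⟩
        rw [hres] at hsome
        simp only at hsome
        subst hsome
        rfl
      rw [hR, Option.getD_some]
      have hsub : ((z :: t).filter (fun y => decide (y.1 ≠ x.1))).Sublist (z :: t) :=
        List.filter_sublist
      exact ih _ _ _ (List.Nodup.sublist (hsub.map _) hnd1) (List.Nodup.sublist (hsub.map _) hnd2)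

-- ---- B-side: the inverted index lists the tests containing an element ----

theorem pvB_inv_inner (i e : Int) :
    ∀ (c : List Int) (d : PySem.Dict Int (List Int)), c.Nodup →
    (c.foldl (fun d x => d.modify x [] (· ++ [i])) d).getD e []
      = d.getD e [] ++ (if c.contains e then [i] else []) := by
  intro c
  induction c with
  | nil => intro d _; simp
  | cons a t ih =>
    intro d hnd
    simp only [List.nodup_cons] at hnd
    rw [List.foldl_cons, ih _ hnd.2]
    rw [PySem.Dict.getD_modify]
    by_cases hea : e = a
    · subst hea
      simp [hnd.1]
    · have hce : (a :: t).contains e = t.contains e := by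
        simp only [List.contains_cons]
        rw [show ((e == a) : Bool) = false by simp; exact hea]
        simp
      rw [if_neg hea, hce]

theorem pvB_inv_outer (e : Int) :
    ∀ (cls : List (List Int)) (s : Int) (d : PySem.Dict Int (List Int)), (∀ c ∈ cls, c.Nodup) →
    ((PySem.List.enumerate cls s).foldl
        (fun d p => p.2.foldl (fun d x => d.modify x [] (· ++ [p.1])) d) d).getD e []
      = d.getD e [] ++ ((PySem.List.enumerate cls s).filter (fun p => p.2.contains e)).map (·.1) := by
  intro cls
  induction cls with
  | nil => intro s d _; simp [PySem.List.enumerate_nil]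
  | cons c cls ih =>
    intro s d hnd
    rw [PySem.List.enumerate_cons, List.foldl_cons]
    rw [ih (s+1) _ (fun c' hc' => hnd c' (List.mem_cons_of_mem _ hc'))]
    have hin := pvB_inv_inner s e c d (hnd c (List.mem_cons_self ..))
    simp only at hin
    rw [hin]
    simp only [List.filter_cons]
    by_cases hc : c.contains e = true
    · rw [hc]
      simp [List.append_assoc]
    · rw [show c.contains e = false from by simpa using hc]
      simp

theorem pvB_inv_char (covs : List (List Int)) (hnd : ∀ c ∈ covs, c.Nodup) (e : Int) :
    (pvBInv covs).getD e []
      = ((PySem.List.enumerate covs).filter (fun p => p.2.contains e)).map (·.1) := by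
  have h := pvB_inv_outer e covs 0 PySem.Dict.empty hnd
  simp only [PySem.Dict.getD_empty, List.nil_append] at h
  exact h

theorem pvB_inv_range (covs : List (List Int)) (hnd : ∀ c ∈ covs, c.Nodup) (e t : Int)
    (ht : t ∈ (pvBInv covs).getD e []) : ∃ m : Nat, t = (m : Int) ∧ m < covs.length := by
  rw [pvB_inv_char covs hnd e] at ht
  obtain ⟨p, hp, rfl⟩ := List.mem_map.1 ht
  have hpe : p ∈ PySem.List.enumerate covs 0 := List.mem_of_mem_filter hp
  obtain ⟨k, hk, rfl⟩ := (PySem.List.mem_enumerate_iff covs 0 p).1 hpe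
  exact ⟨k, by simp, hk⟩

theorem pvB_inv_count (covs : List (List Int)) (hnd : ∀ c ∈ covs, c.Nodup) (e : Int)
    (j : Nat) (hj : j < covs.length) :
    ((pvBInv covs).getD e []).count ((j : Nat) : Int)
      = if (covs.getD j []).contains e then 1 else 0 := by
  rw [pvB_inv_char covs hnd e]
  have hsub : (((PySem.List.enumerate covs).filter (fun p => p.2.contains e)).map (·.1)).Sublist
      ((PySem.List.enumerate covs).map (·.1)) := List.filter_sublist.map _
  have hnodup : (((PySem.List.enumerate covs).filter (fun p => p.2.contains e)).map (·.1)).Nodup := by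
    refine List.Nodup.sublist hsub ?_
    rw [PySem.List.map_fst_enumerate]
    exact PySem.List.nodup_pyRange_one 0 (0 + covs.length)
  have hgd : covs.getD j [] = covs[j] := List.getD_eq_getElem _ _ hj
  rw [hgd]
  have hmem : ((j : Int) ∈ ((PySem.List.enumerate covs).filter (fun p => p.2.contains e)).map (·.1))
      ↔ covs[j].contains e = true := by
    constructor
    · rintro hm
      obtain ⟨p, hp, hp1⟩ := List.mem_map.1 hm
      have hpe : p ∈ PySem.List.enumerate covs 0 := List.mem_of_mem_filter hp
      obtain ⟨k, hk, rfl⟩ := (PySem.List.mem_enumerate_iff covs 0 p).1 hpe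
      have hkj : k = j := by
        simp only [zero_add] at hp1
        exact_mod_cast hp1
      subst hkj
      have hfe := List.of_mem_filter hp
      simp only at hfe
      simpa using hfe
    · intro hc
      refine List.mem_map.2 ⟨((j : Int), covs[j]), ?_, by simp⟩
      refine List.mem_filter.2 ⟨?_, ?_⟩
      · exact (PySem.List.mem_enumerate_iff covs 0 _).2 ⟨j, hj, by simp⟩
      · simpa using hc
  by_cases hc : covs[j].contains e = true
  · rw [if_pos hc]
    exact List.count_eq_one_of_mem hnodup (hmem.2 hc)
  · rw [if_neg hc]
    rw [List.count_eq_zero]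
    intro hm
    exact hc (hmem.1 hm)

-- ---- B-side: gain bookkeeping ----

theorem pvB_dec :
    ∀ (ts g : List Int), (∀ t ∈ ts, ∃ m : Nat, t = (m : Int) ∧ m < g.length) →
    (pvBDec g ts).length = g.length ∧
    ∀ j : Nat, j < g.length → (pvBDec g ts).getD j 0 = g.getD j 0 - (ts.count ((j : Nat) : Int) : Int) := by
  intro ts
  induction ts with
  | nil => intro g _; exact ⟨rfl, by intro j _; simp [pvBDec]⟩
  | cons t ts ih =>
    intro g hts
    obtain ⟨m, rfl, hm⟩ := hts t (List.mem_cons_self ..)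
    have hstep : pvBDec g ((m : Int) :: ts)
        = pvBDec (g.set m (g.getD m 0 - 1)) ts := by
      simp only [pvBDec, List.foldl_cons, PySem.List.pySetD_natCast, PySem.List.pyGetD_natCast]
    have hlen' : (g.set m (g.getD m 0 - 1)).length = g.length := List.length_set
    have hts' : ∀ t' ∈ ts, ∃ m' : Nat, t' = (m' : Int) ∧ m' < (g.set m (g.getD m 0 - 1)).length := by
      intro t' ht'
      obtain ⟨m', h1, h2⟩ := hts t' (List.mem_cons_of_mem _ ht')
      exact ⟨m', h1, by omega⟩
    obtain ⟨ih1, ih2⟩ := ih (g.set m (g.getD m 0 - 1)) hts'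
    refine ⟨by rw [hstep, ih1, hlen'], ?_⟩
    intro j hj
    rw [hstep, ih2 j (by omega)]
    have hset : (g.set m (g.getD m 0 - 1)).getD j 0
        = if m = j then g.getD m 0 - 1 else g.getD j 0 := by
      rw [List.getD_eq_getElem?_getD, List.getElem?_set]
      by_cases hmj : m = j
      · subst hmj
        rw [if_pos rfl, if_pos hm]
        simp
      · rw [if_neg hmj, ← List.getD_eq_getElem?_getD, if_neg hmj]
    have hcnt : (((m : Int) :: ts).count ((j : Nat) : Int))
        = ts.count ((j : Nat) : Int) + if m = j then 1 else 0 := by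
      rw [List.count_cons]
      by_cases hmj : m = j
      · subst hmj; simp
      · rw [if_neg hmj, show (((m : Int)) == ((j : Nat) : Int)) = false by
          simp only [beq_eq_false_iff_ne, ne_eq, Int.natCast_inj]
          exact_mod_cast hmj]
        simp
    rw [hset, hcnt]
    by_cases hmj : m = j
    · subst hmj; simp; ring
    · rw [if_neg hmj, if_neg hmj]; push_cast; ring

theorem pv_filter_len (e : Int) (p : Int → Bool) (hp : p e = true) :
    ∀ (l : List Int), l.Nodup →
    (l.filter (fun x => p x && !(x == e))).length + (if l.contains e then 1 else 0)
      = (l.filter p).length := by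
  intro l
  induction l with
  | nil => simp
  | cons a t ih =>
    intro hnd
    simp only [List.nodup_cons] at hnd
    by_cases hae : a = e
    · subst hae
      have hte : t.contains a = false := by
        simp only [List.contains_eq_mem, decide_eq_false_iff_not]
        exact hnd.1
      have hca : (a :: t).contains a = true := by simp
      rw [List.filter_cons, List.filter_cons]
      rw [show (p a && !(a == a)) = false by simp]
      rw [hp, hca, if_pos rfl]
      have h2 := ih hnd.2
      rw [hte] at h2
      simpa using h2
    · have hcc : (a :: t).contains e = t.contains e := by
        simp only [List.contains_cons]
        rw [show ((e == a) : Bool) = false by simp; exact fun h => hae h.symm]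
        simp
      rw [List.filter_cons, List.filter_cons, hcc]
      have h2 := ih hnd.2
      by_cases hpa : p a = true
      · rw [show (p a && !(a == e)) = true by simp [hpa, hae], hpa]
        simp only [if_true, List.length_cons]
        omega
      · rw [show (p a && !(a == e)) = false by simp [hpa], show p a = false by simpa using hpa]
        simpa using h2

theorem pv_gain_step (sel : PySem.Set Int) (e : Int) (c : List Int)
    (he : PySem.Set.contains sel e = false) :
    pvGainOf (PySem.Set.add sel e) c = pvGainOf sel c - (if c.contains e then 1 else 0) := by
  have hadd : PySem.Set.add sel e = sel ++ [e] := by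
    simp only [PySem.Set.add, he, Bool.false_eq_true, if_false]
  have hp : (!List.contains sel e) = true := by
    have h' : List.contains sel e = false := he
    rw [h']
    rfl
  have hfl := pv_filter_len e (fun x => !List.contains sel x) hp
      (PySem.Set.ofList c) (PySem.Set.nodup_ofList c)
  beta_reduce at hfl
  have hmem : List.contains (PySem.Set.ofList c) e = c.contains e := by
    rw [List.contains_eq_mem, List.contains_eq_mem]
    exact decide_eq_decide.2 (PySem.Set.mem_ofList c e)
  rw [hmem] at hfl
  simp only [pvGainOf, PySem.Set.len, PySem.Set.diff, PySem.Set.contains, hadd]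
  have hpred : ∀ x ∈ PySem.Set.ofList c, (!List.contains (sel ++ [e]) x)
      = ((!List.contains sel x) && !(x == e)) := by
    intro x _
    rw [List.contains_append]
    rw [show (List.contains [e] x) = (x == e) by
      simp only [List.contains_cons, List.contains_nil, Bool.or_false]]
    rw [Bool.not_or]
  rw [List.filter_congr hpred]
  by_cases hc : c.contains e = true
  · rw [hc, if_pos rfl] at hfl
    rw [if_pos hc]
    omega
  · rw [show c.contains e = false by simpa using hc] at hfl
    rw [if_neg (by simpa using hc)]
    simp only [Bool.false_eq_true, if_false] at hfl
    omega

theorem pv_gain_congr (s s' : PySem.Set Int) (h : ∀ x, PySem.Set.contains s x = PySem.Set.contains s' x)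
    (c : List Int) : pvGainOf s c = pvGainOf s' c := by
  simp only [pvGainOf, PySem.Set.diff]
  rw [List.filter_congr (fun x _ => by rw [h x])]

theorem pvB_cover (tcs0 : List (String × List Int)) :
    ∀ (es : List Int) (covered : PySem.Set Int) (gain : List Int) (sel : PySem.Set Int),
    gain.length = tcs0.length →
    (∀ x : Int, PySem.Set.contains covered x = PySem.Set.contains sel x) →
    (∀ j : Nat, j < tcs0.length → gain.getD j 0 = pvGainOf sel (tcs0.getD j ("", [])).2) →
    (pvBCover (pvBInv (tcs0.map (fun p => PySem.List.dedup p.2))) es (covered, gain)).2.length = tcs0.length ∧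
    (∀ x : Int, PySem.Set.contains (pvBCover (pvBInv (tcs0.map (fun p => PySem.List.dedup p.2))) es (covered, gain)).1 x
        = PySem.Set.contains (PySem.Set.update sel es) x) ∧
    (∀ j : Nat, j < tcs0.length →
      (pvBCover (pvBInv (tcs0.map (fun p => PySem.List.dedup p.2))) es (covered, gain)).2.getD j 0
        = pvGainOf (PySem.Set.update sel es) (tcs0.getD j ("", [])).2) := by
  intro es
  induction es with
  | nil =>
    intro covered gain sel hlen H3 H2
    exact ⟨hlen, H3, H2⟩
  | cons e rest ih =>
    intro covered gain sel hlen H3 H2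
    have hupd : PySem.Set.update sel (e :: rest) = PySem.Set.update (PySem.Set.add sel e) rest := rfl
    by_cases hc : PySem.Set.contains covered e = true
    · have hse : PySem.Set.contains sel e = true := by rw [← H3 e]; exact hc
      have hadd : PySem.Set.add sel e = sel := by simp only [PySem.Set.add, hse, if_true]
      have hstep : pvBCover (pvBInv (tcs0.map (fun p => PySem.List.dedup p.2))) (e :: rest) (covered, gain)
          = pvBCover (pvBInv (tcs0.map (fun p => PySem.List.dedup p.2))) rest (covered, gain) := by
        simp only [pvBCover, hc, if_true]
      rw [hstep, hupd, hadd]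
      exact ih covered gain sel hlen H3 H2
    · have hcf : PySem.Set.contains covered e = false := by simpa using hc
      have hse : PySem.Set.contains sel e = false := by rw [← H3 e]; exact hcf
      have hcnodup : ∀ c' ∈ tcs0.map (fun p => PySem.List.dedup p.2), c'.Nodup := by
        intro c' hc'
        obtain ⟨p, _, rfl⟩ := List.mem_map.1 hc'
        exact PySem.List.nodup_dedup p.2
      have hrange : ∀ t ∈ (pvBInv (tcs0.map (fun p => PySem.List.dedup p.2))).getD e [],
          ∃ m : Nat, t = (m : Int) ∧ m < gain.length := by
        intro t ht
        obtain ⟨m, h1, h2⟩ := pvB_inv_range _ hcnodup e t ht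
        exact ⟨m, h1, by rw [hlen]; simpa using h2⟩
      obtain ⟨hdlen, hdval⟩ :=
        pvB_dec ((pvBInv (tcs0.map (fun p => PySem.List.dedup p.2))).getD e []) gain hrange
      have hstep : pvBCover (pvBInv (tcs0.map (fun p => PySem.List.dedup p.2))) (e :: rest) (covered, gain)
          = pvBCover (pvBInv (tcs0.map (fun p => PySem.List.dedup p.2))) rest
              (PySem.Set.add covered e,
               pvBDec gain ((pvBInv (tcs0.map (fun p => PySem.List.dedup p.2))).getD e [])) := by
        simp only [pvBCover, hcf, Bool.false_eq_true, if_false]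
      have H3' : ∀ x : Int, PySem.Set.contains (PySem.Set.add covered e) x
          = PySem.Set.contains (PySem.Set.add sel e) x := by
        intro x
        simp only [PySem.Set.add, hcf, hse, Bool.false_eq_true, if_false]
        simp only [PySem.Set.contains, List.contains_append]
        have h3x := H3 x
        simp only [PySem.Set.contains] at h3x
        rw [h3x]
      have H2' : ∀ j : Nat, j < tcs0.length →
          (pvBDec gain ((pvBInv (tcs0.map (fun p => PySem.List.dedup p.2))).getD e [])).getD j 0
            = pvGainOf (PySem.Set.add sel e) (tcs0.getD j ("", [])).2 := by
        intro j hj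
        rw [hdval j (by omega), H2 j hj]
        have hcount := pvB_inv_count _ hcnodup e j (by simpa using hj)
        rw [hcount]
        rw [pv_gain_step sel e (tcs0.getD j ("", [])).2 hse]
        have hcc : (tcs0.map (fun p => PySem.List.dedup p.2)).getD j []
            = PySem.List.dedup (tcs0.getD j ("", [])).2 := by
          rw [List.getD_eq_getElem _ _ (by simpa using hj), List.getD_eq_getElem _ _ hj]
          simp
        rw [hcc]
        have hde : (PySem.List.dedup (tcs0.getD j ("", [])).2).contains e
            = (tcs0.getD j ("", [])).2.contains e := by
          rw [List.contains_eq_mem, List.contains_eq_mem]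
          exact decide_eq_decide.2 (PySem.List.mem_dedup _ e)
        rw [hde]
        split_ifs <;> simp
      rw [hstep, hupd]
      exact ih _ _ _ (by rw [hdlen, hlen]) H3' H2'

-- ---- B-side: the index scan equals the reference scan ----

theorem pvB_scan (tcs0 : List (String × List Int)) (alive : List Bool) (gain : List Int)
    (sel : PySem.Set Int)
    (H2 : ∀ j : Nat, j < tcs0.length → gain.getD j 0 = pvGainOf sel (tcs0.getD j ("", [])).2) :
    ∀ (L : List Int), (∀ i ∈ L, ∃ k : Nat, i = (k : Int) ∧ k < tcs0.length) →
    ∀ (bo : Option (Int × String × List Int)) (bg : Int),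
    pvBScan alive gain L (pvEnc bo, bg)
      = (pvEnc (pvRefBest sel ((L.filter (fun i => PySem.List.pyGetD alive i false)).map
            (fun i => (i, tcs0.getD i.toNat ("", [])))) (bo, bg)).1,
         (pvRefBest sel ((L.filter (fun i => PySem.List.pyGetD alive i false)).map
            (fun i => (i, tcs0.getD i.toNat ("", [])))) (bo, bg)).2) := by
  intro L
  induction L with
  | nil => intro _ bo bg; rfl
  | cons i L ih =>
    intro hL bo bg
    obtain ⟨k, rfl, hk⟩ := hL i (List.mem_cons_self ..)
    have hL' := fun i' hi' => hL i' (List.mem_cons_of_mem _ hi')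
    by_cases ha : PySem.List.pyGetD alive ((k : Nat) : Int) false = true
    · have hgv : PySem.List.pyGetD gain ((k : Nat) : Int) 0
          = pvGainOf sel (tcs0.getD k ("", [])).2 := by
        rw [PySem.List.pyGetD_natCast]
        exact H2 k hk
      have hfc : (((k : Int) :: L).filter (fun i => PySem.List.pyGetD alive i false))
          = (k : Int) :: L.filter (fun i => PySem.List.pyGetD alive i false) := by
        rw [List.filter_cons, if_pos ha]
      simp only [pvBScan, hfc, List.map_cons, Int.toNat_natCast]
      simp only [ha, Bool.true_and, hgv]
      simp only [pvRefBest]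
      by_cases hg : pvGainOf sel (tcs0.getD k ("", [])).2 > bg
      · rw [if_pos (decide_eq_true hg), if_pos hg]
        exact ih hL' (some ((k : Int), tcs0.getD k ("", []))) (pvGainOf sel (tcs0.getD k ("", [])).2)
      · rw [if_neg (by simp only [decide_eq_true_eq]; exact hg), if_neg hg]
        exact ih hL' bo bg
    · have haf : PySem.List.pyGetD alive ((k : Nat) : Int) false = false := by simpa using ha
      have hfc : (((k : Int) :: L).filter (fun i => PySem.List.pyGetD alive i false))
          = L.filter (fun i => PySem.List.pyGetD alive i false) := by
        rw [List.filter_cons, haf]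
        simp
      simp only [pvBScan, hfc, haf, Bool.false_and]
      simp only [Bool.false_eq_true, if_false]
      exact ih hL' bo bg

theorem pv_remOf_eq (tcs0 : List (String × List Int)) (alive : List Bool) :
    pvRemOf tcs0 alive
      = ((PySem.List.pyRange 0 (tcs0.length : Int) 1).filter
            (fun i => PySem.List.pyGetD alive i false)).map
          (fun i => (i, tcs0.getD i.toNat ("", []))) := by
  unfold pvRemOf
  rw [PySem.List.enumerate_eq_map_pyRange tcs0 ("", [])]
  rw [List.filter_map]
  rw [show ((fun p : Int × String × List Int => PySem.List.pyGetD alive p.1 false)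
        ∘ (fun j : Int => (j, PySem.List.pyGetD tcs0 j ("", []))))
      = (fun j : Int => PySem.List.pyGetD alive j false) from rfl]
  rw [show PySem.List.len tcs0 = (tcs0.length : Int) from rfl]
  apply List.map_congr_left
  intro j hj
  have hj' := List.mem_of_mem_filter hj
  have hb := PySem.List.mem_pyRange_one.1 hj'
  have hjt : j.toNat < tcs0.length := by omega
  rw [PySem.List.pyGetD_eq_getElem tcs0 ("", []) hb.1 hb.2]
  rw [List.getD_eq_getElem _ _ hjt]

theorem pv_remOf_set (tcs0 : List (String × List Int)) (alive : List Bool) (k : Nat)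
    (hk : k < tcs0.length) (hlen : alive.length = tcs0.length) :
    pvRemOf tcs0 (alive.set k false)
      = (pvRemOf tcs0 alive).filter (fun y => decide (y.1 ≠ ((k : Nat) : Int))) := by
  unfold pvRemOf
  have h : ∀ p ∈ PySem.List.enumerate tcs0, (PySem.List.pyGetD (alive.set k false) p.1 false)
      = (decide (p.1 ≠ ((k : Nat) : Int)) && (PySem.List.pyGetD alive p.1 false)) := by
    intro p hp
    obtain ⟨m, hm, rfl⟩ := (PySem.List.mem_enumerate_iff tcs0 0 p).1 hp
    simp only [zero_add, PySem.List.pyGetD_natCast]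
    by_cases hkm : k = m
    · subst hkm
      rw [List.getD_eq_getElem?_getD, List.getElem?_set, if_pos rfl, if_pos (by omega)]
      simp
    · rw [List.getD_eq_getElem?_getD, List.getElem?_set, if_neg hkm, ← List.getD_eq_getElem?_getD]
      rw [show (decide (((m : Nat) : Int) ≠ ((k : Nat) : Int))) = true by
        simp only [ne_eq, Int.natCast_inj, decide_eq_true_eq]
        exact fun h' => hkm h'.symm]
      rw [Bool.true_and]
  rw [List.filter_congr h]
  exact (List.filter_filter).symm

theorem pv_remOf_mem (tcs0 : List (String × List Int)) (alive : List Bool)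
    (x : Int × String × List Int) (hx : x ∈ pvRemOf tcs0 alive) :
    ∃ k : Nat, k < tcs0.length ∧ x = ((k : Int), tcs0.getD k ("", [])) := by
  have hx' : x ∈ PySem.List.enumerate tcs0 := List.mem_of_mem_filter hx
  obtain ⟨k, hk, rfl⟩ := (PySem.List.mem_enumerate_iff tcs0 0 _).1 hx'
  exact ⟨k, hk, by rw [List.getD_eq_getElem _ _ hk]; simp⟩

theorem pv_remOf_tags_nodup (tcs0 : List (String × List Int)) (alive : List Bool) :
    ((pvRemOf tcs0 alive).map (·.1)).Nodup := by
  have hsub : ((pvRemOf tcs0 alive).map (·.1)).Sublist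
      ((PySem.List.enumerate tcs0).map (·.1)) := List.filter_sublist.map _
  refine List.Nodup.sublist hsub ?_
  rw [PySem.List.map_fst_enumerate]
  exact PySem.List.nodup_pyRange_one 0 (0 + tcs0.length)

theorem pvB_ref (tcs0 : List (String × List Int)) :
    ∀ (r : Nat) (alive : List Bool) (gain : List Int) (covered sel : PySem.Set Int)
      (acc : List String),
    alive.length = tcs0.length → gain.length = tcs0.length →
    (pvRemOf tcs0 alive).length = r →
    (∀ j : Nat, j < tcs0.length → gain.getD j 0 = pvGainOf sel (tcs0.getD j ("", [])).2) →
    (∀ x : Int, PySem.Set.contains covered x = PySem.Set.contains sel x) →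
    pvBRounds (tcs0.map Prod.fst) (tcs0.map (fun p => PySem.List.dedup p.2))
        (pvBInv (tcs0.map (fun p => PySem.List.dedup p.2))) r alive gain covered acc
      = pvRefLoop r (pvRemOf tcs0 alive) sel acc := by
  intro r
  induction r with
  | zero => intro alive gain covered sel acc _ _ _ _ _; rfl
  | succ r ih =>
    intro alive gain covered sel acc hal hgl hrl H2 H3
    have hne : pvRemOf tcs0 alive ≠ [] := by
      intro h
      rw [h] at hrl
      simp at hrl
    obtain ⟨x, hx, hsome⟩ := pvRefBest_some sel (pvRemOf tcs0 alive) hne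
    obtain ⟨k, hk, hxk⟩ := pv_remOf_mem tcs0 alive x hx
    have hx1 : x.1 = ((k : Nat) : Int) := by rw [hxk]
    have hscanL : ∀ i ∈ PySem.List.pyRange 0 (tcs0.length : Int) 1,
        ∃ k' : Nat, i = (k' : Int) ∧ k' < tcs0.length := by
      intro i hi
      have hb := PySem.List.mem_pyRange_one.1 hi
      exact ⟨i.toNat, by omega, by omega⟩
    have hscan := pvB_scan tcs0 alive gain sel H2
        (PySem.List.pyRange 0 (tcs0.length : Int) 1) hscanL none (-1)
    rw [← pv_remOf_eq tcs0 alive] at hscan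
    simp only [pvEnc] at hscan
    have hname : (PySem.List.pyGet? (tcs0.map Prod.fst) ((k : Nat) : Int)).getD "" = x.2.1 := by
      rw [PySem.List.pyGet?_natCast, List.getElem?_map, List.getElem?_eq_getElem hk]
      rw [hxk, List.getD_eq_getElem _ _ hk]
      rfl
    have hcovk : (PySem.List.pyGet? (tcs0.map (fun p => PySem.List.dedup p.2)) ((k : Nat) : Int)).getD []
        = PySem.List.dedup x.2.2 := by
      rw [PySem.List.pyGet?_natCast, List.getElem?_map, List.getElem?_eq_getElem hk]
      rw [hxk, List.getD_eq_getElem _ _ hk]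
      rfl
    obtain ⟨hc1, hc2, hc3⟩ := pvB_cover tcs0 (PySem.List.dedup x.2.2) covered gain sel hgl H3 H2
    have hmm : ∀ z : Int, PySem.Set.contains (PySem.Set.update sel (PySem.List.dedup x.2.2)) z
        = PySem.Set.contains (PySem.Set.update sel x.2.2) z := by
      intro z
      simp only [PySem.Set.contains, List.contains_eq_mem]
      exact decide_eq_decide.2 (by
        rw [PySem.Set.mem_update, PySem.Set.mem_update, PySem.List.mem_dedup])
    have H3' : ∀ z : Int,
        PySem.Set.contains (pvBCover (pvBInv (tcs0.map (fun p => PySem.List.dedup p.2)))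
            (PySem.List.dedup x.2.2) (covered, gain)).1 z
          = PySem.Set.contains (PySem.Set.update sel x.2.2) z :=
      fun z => (hc2 z).trans (hmm z)
    have H2' : ∀ j : Nat, j < tcs0.length →
        (pvBCover (pvBInv (tcs0.map (fun p => PySem.List.dedup p.2)))
            (PySem.List.dedup x.2.2) (covered, gain)).2.getD j 0
          = pvGainOf (PySem.Set.update sel x.2.2) (tcs0.getD j ("", [])).2 :=
      fun j hj => (hc3 j hj).trans (pv_gain_congr _ _ hmm _)
    have hrl' : (pvRemOf tcs0 (alive.set k false)).length = r := by
      rw [pv_remOf_set tcs0 alive k hk hal]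
      have hfl := pv_filter_ne_len (fun y : Int × String × List Int => y.1)
          (pvRemOf tcs0 alive) x (pv_remOf_tags_nodup tcs0 alive) hx
      beta_reduce at hfl
      rw [hx1] at hfl
      omega
    have hR : pvRefLoop (r+1) (pvRemOf tcs0 alive) sel acc
        = pvRefLoop r ((pvRemOf tcs0 alive).filter (fun y => decide (y.1 ≠ x.1)))
            (PySem.Set.update sel x.2.2) (acc ++ [x.2.1]) := by
      simp only [pvRefLoop]
      rw [show (pvRemOf tcs0 alive).isEmpty = false by
        simp only [List.isEmpty_eq_false_iff]
        exact hne]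
      simp only [Bool.false_eq_true, if_false]
      rcases hres : pvRefBest sel (pvRemOf tcs0 alive) (none, -1) with ⟨bo, G⟩
      rw [hres] at hsome
      simp only at hsome
      subst hsome
      rfl
    have hset := pv_remOf_set tcs0 alive k hk hal
    rw [← hx1] at hset
    rw [hR, ← hset]
    simp only [pvBRounds, List.length_map]
    rw [hscan]
    simp only [hsome, hx1]
    rw [hname, hcovk]
    simp only [PySem.List.pySetD_natCast]
    exact ih (alive.set k false) _ _ (PySem.Set.update sel x.2.2) (acc ++ [x.2.1])
      (by rw [List.length_set]; exact hal) hc1 hrl' H2' H3'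

-- ===== VERDICT (by name: the statement is the Claim_ definition above) =====
theorem prioritize_by_coverage_spec : Claim_equal_prioritize_by_coverage := by
  intro tcs _ hpre
  unfold Spec_prioritize_by_coverage prioritize_by_coverage prioritize_by_coverage_alt
  -- A side equals the reference loop on the index-tagged list
  have hsnd : (PySem.List.enumerate tcs 0).map (·.2) = tcs := PySem.List.map_snd_enumerate tcs 0
  have htags : ((PySem.List.enumerate tcs 0).map (·.1)).Nodup := by
    rw [PySem.List.map_fst_enumerate]
    exact PySem.List.nodup_pyRange_one 0 (0 + tcs.length)
  have hnames : ((PySem.List.enumerate tcs 0).map (fun y => y.2.1)).Nodup := by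
    have : (PySem.List.enumerate tcs 0).map (fun y => y.2.1)
        = ((PySem.List.enumerate tcs 0).map (·.2)).map Prod.fst := by
      rw [List.map_map]
      rfl
    rw [this, hsnd]
    exact hpre
  have hA : pvALoop tcs.length tcs PySem.Set.empty []
      = pvRefLoop tcs.length (PySem.List.enumerate tcs 0) PySem.Set.empty [] := by
    have hstep : pvALoop tcs.length tcs PySem.Set.empty []
        = pvALoop tcs.length ((PySem.List.enumerate tcs 0).map (·.2)) PySem.Set.empty [] := by
      rw [hsnd]
    rw [hstep]
    exact pvA_ref tcs.length (PySem.List.enumerate tcs 0) PySem.Set.empty [] htags hnames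
  -- B side equals the reference loop on the same list
  have hall : pvRemOf tcs (List.replicate tcs.length true)
      = PySem.List.enumerate tcs 0 := by
    unfold pvRemOf
    apply List.filter_eq_self.2
    intro p hp
    obtain ⟨m, hm, rfl⟩ := (PySem.List.mem_enumerate_iff tcs 0 p).1 hp
    simp only [zero_add, PySem.List.pyGetD_natCast]
    rw [List.getD_replicate]
    simpa using hm
  have hB : pvBRounds (tcs.map Prod.fst) (tcs.map (fun p => PySem.List.dedup p.2))
        (pvBInv (tcs.map (fun p => PySem.List.dedup p.2))) (tcs.map Prod.fst).length
        (List.replicate (tcs.map Prod.fst).length true)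
        ((tcs.map (fun p => PySem.List.dedup p.2)).map (fun c => (c.length : Int)))
        PySem.Set.empty []
      = pvRefLoop tcs.length (PySem.List.enumerate tcs 0) PySem.Set.empty [] := by
    have hlen1 : (tcs.map Prod.fst).length = tcs.length := by simp
    rw [hlen1]
    have h := pvB_ref tcs tcs.length (List.replicate tcs.length true)
        ((tcs.map (fun p => PySem.List.dedup p.2)).map (fun c => (c.length : Int)))
        PySem.Set.empty PySem.Set.empty []
        (by rw [List.length_replicate])
        (by rw [List.length_map, List.length_map])
        (by rw [hall, PySem.List.length_enumerate])
        (by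
          intro j hj
          have hj1 : j < ((tcs.map (fun p => PySem.List.dedup p.2)).map
              (fun c => (c.length : Int))).length := by
            rw [List.length_map, List.length_map]
            exact hj
          rw [List.getD_eq_getElem _ _ hj1]
          have hj2 : j < (tcs.map (fun p => PySem.List.dedup p.2)).length := by
            rw [List.length_map]
            exact hj
          rw [List.getElem_map, List.getElem_map]
          simp only [pvGainOf, PySem.Set.diff, PySem.Set.len]
          rw [show (fun x : Int => !PySem.Set.contains PySem.Set.empty x) = (fun _ : Int => true)
            from funext (fun x => rfl)]
          rw [List.filter_true, PySem.List.dedup_eq_ofList]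
          rw [List.getD_eq_getElem _ _ hj])
        (fun x => rfl)
    rw [hall] at h
    exact h
  rw [hA, hB]
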